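-- pv_equiv track=rewrite | github.com/ando-huang/leetcode | medium/k_unique.py | solve
-- ===== SOURCE A (Python) =====
-- def solve(s, k):
--     d = {}
--     for i in s:
--         if i in d:
--             d[i] += 1
--         else:
--             d[i]= 1
--
--     count = 0
--     if len(d) < k:
--         return 0
--
--     while(len(d) != k):
--         min_key = min(d, key=d.get)
--         count += d[min_key]
--         del d[min_key]
--
--     return count
-- ===== SOURCE B (Python) =====
-- def solve(s, k):
--     freq = {}
--     for ch in s:
--         freq[ch] = freq.get(ch, 0) + 1
--     vals = sorted(freq.values())
--     m = len(vals)
--     if m < k: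
--         return 0
--     return sum(vals[:m - k])
-- ===== Notes on version B (the rewrite author's own statement) =====
-- stated objective: alternative
-- what changed: Instead of repeatedly scanning the dict for the minimum-frequency key and deleting it (quadratic in the number m of distinct chars), B sorts the frequency list once and sums the smallest m-k values; with ASCII alphabets m is small, so measured times are similar.
import Mathlib
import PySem

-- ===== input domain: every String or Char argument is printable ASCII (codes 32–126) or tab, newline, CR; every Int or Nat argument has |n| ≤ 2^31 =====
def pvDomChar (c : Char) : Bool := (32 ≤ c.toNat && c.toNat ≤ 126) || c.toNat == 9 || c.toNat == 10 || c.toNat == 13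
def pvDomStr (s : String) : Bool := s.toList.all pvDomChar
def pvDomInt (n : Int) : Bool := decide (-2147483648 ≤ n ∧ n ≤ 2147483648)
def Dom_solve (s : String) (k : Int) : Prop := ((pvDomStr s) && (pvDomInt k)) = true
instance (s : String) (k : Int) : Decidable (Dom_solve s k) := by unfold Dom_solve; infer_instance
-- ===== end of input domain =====

-- B replaces A's repeated min-scan-and-delete over the dict (quadratic in the number of
-- distinct characters) by sorting the frequency list once and summing the smallest m-k values.

-- ===== PORT A =====
-- A's while loop: while len(d) != k: remove the min-frequency key (first minimal, by
-- insertion order of keys) and add its count. Fuel = d.size bounds the iterations; when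
-- Python would raise (min of an empty dict, k < 0) min? is none and the branch is
-- unreachable inside Pre_solve.
def solveLoop (fuel : Nat) (d : PySem.Dict Char Int) (k : Int) (count : Int) : Int :=
  match fuel with
  | 0 => count
  | fuel + 1 =>
    if (d.size : Int) = k then count
    else
      match PySem.List.min? d.keys (fun c => d.getD c 0) with
      | none => count          -- Python raises ValueError here; excluded by Pre_solve
      | some m => solveLoop fuel (d.erase m) k (count + d.getD m 0)

def solve (s : String) (k : Int) : Int :=
  let d := s.toList.foldl
    (fun d i => if d.contains i then d.insert i (d.getD i 0 + 1) else d.insert i 1)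
    PySem.Dict.empty
  if (d.size : Int) < k then 0
  else solveLoop d.size d k 0

-- ===== PORT B =====
def solve_alt (s : String) (k : Int) : Int :=
  let freq := s.toList.foldl (fun d c => d.insert c (d.getD c 0 + 1)) PySem.Dict.empty
  let vals := PySem.List.sorted freq.values (fun x => x)
  let m : Int := (vals.length : Int)
  if m < k then 0
  else (PySem.List.slice vals none (some (m - k))).sum

-- ===== PRECONDITION & SPEC =====
-- Pre_solve excludes exactly k < 0, where A's while-loop empties the dict and
-- min({}) raises ValueError.
def Pre_solve (_s : String) (k : Int) : Prop := 0 ≤ k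
instance (s : String) (k : Int) : Decidable (Pre_solve s k) := by unfold Pre_solve; infer_instance

def pvWitness_solve : String × Int := ("aabc", 2)

def Spec_solve (s : String) (k : Int) (out : Int) : Prop := out = solve_alt s k
instance (s : String) (k : Int) (out : Int) : Decidable (Spec_solve s k out) := by unfold Spec_solve; infer_instance

-- ===== CLAIM (what is proved, stated in full; the proofs are below) =====
def Claim_equal_solve : Prop := ∀ (s : String) (k : Int), Dom_solve s k → Pre_solve s k → Spec_solve s k (solve s k)

-- ===== LEMMAS AND PROOFS =====

lemma buildA_eq_counter (cs : List Char) :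
    cs.foldl (fun d i => if d.contains i then d.insert i (d.getD i 0 + 1) else d.insert i 1)
      PySem.Dict.empty = PySem.Dict.counter cs := by
  rw [← PySem.Dict.foldl_insert_getD_add_one_eq_counter]
  apply PySem.List.foldl_congr_mem
  intro acc x _
  by_cases h : acc.contains x
  · simp [h]
  · simp [h, PySem.Dict.getD_of_not_contains acc (0 : Int) (by simpa using h)]

lemma perm_cons_filter_key {ν : Type} (l : List (Char × ν)) (m : Char) (v : ν)
    (hnd : (l.map Prod.fst).Nodup) (hmem : (m, v) ∈ l) :
    l.Perm ((m, v) :: l.filter (fun p => !(p.1 == m))) := by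
  induction l with
  | nil => cases hmem
  | cons a t ih =>
    simp only [List.map_cons, List.nodup_cons] at hnd
    rcases List.mem_cons.mp hmem with h | h
    · subst h
      have ht : t.filter (fun p => !(p.1 == m)) = t := by
        apply List.filter_eq_self.mpr
        intro p hp
        simp only [Bool.not_eq_eq_eq_not, Bool.not_true, beq_eq_false_iff_ne]
        intro he
        exact hnd.1 (by simpa [← he] using List.mem_map_of_mem (f := Prod.fst) hp)
      simp [ht]
    · have hne : a.1 ≠ m := by
        intro he
        exact hnd.1 (by simpa [he] using List.mem_map_of_mem (f := Prod.fst) h)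
      have h1 : (a :: t).Perm (a :: (m, v) :: t.filter (fun p => !(p.1 == m))) :=
        (ih hnd.2 h).cons a
      have h2 : (a :: (m, v) :: t.filter (fun p => !(p.1 == m))).Perm
          ((m, v) :: a :: t.filter (fun p => !(p.1 == m))) := List.Perm.swap _ _ _
      have h3 : (m, v) :: a :: t.filter (fun p => !(p.1 == m))
          = (m, v) :: (a :: t).filter (fun p => !(p.1 == m)) := by
        simp [hne]
      exact (h1.trans h2).trans (h3 ▸ List.Perm.refl _)

lemma sorted_min_cons (l l' : List Int) (v : Int)
    (hperm : l.Perm (v :: l')) (hv : ∀ w ∈ l', v ≤ w) :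
    PySem.List.sorted l (fun x => x) = v :: PySem.List.sorted l' (fun x => x) := by
  apply PySem.List.eq_of_perm_of_pairwise_le
  · exact (PySem.List.sorted_perm l _ false).trans
      (hperm.trans ((PySem.List.sorted_perm l' _ false).symm.cons v))
  · exact PySem.List.sorted_pairwise l (fun x => x)
  · exact List.Pairwise.cons
      (fun w hw => hv w ((PySem.List.sorted_perm l' _ false).mem_iff.mp hw))
      (PySem.List.sorted_pairwise l' (fun x => x))

lemma solveLoop_eq (fuel : Nat) : ∀ (d : PySem.Dict Char Int) (k c : Int),
    d.keys.Nodup → 0 ≤ k → k ≤ (d.size : Int) → d.size - k.toNat ≤ fuel →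
    solveLoop fuel d k c =
      c + ((PySem.List.sorted d.values (fun x => x)).take (d.size - k.toNat)).sum := by
  induction fuel with
  | zero =>
    intro d k c hnd hk hks hfuel
    have : d.size - k.toNat = 0 := by omega
    simp [solveLoop, this]
  | succ fuel ih =>
    intro d k c hnd hk hks hfuel
    by_cases hsz : (d.size : Int) = k
    · have : d.size - k.toNat = 0 := by omega
      simp [solveLoop, hsz, this]
    · -- k < size, dict nonempty
      have hlt : (k : Int) < (d.size : Int) := lt_of_le_of_ne hks (fun h => hsz h.symm)
      have hpos : 0 < d.size := by omega
      have hkeysne : d.keys ≠ [] := fun h => by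
        have h0 : d.size = 0 := by
          simpa [PySem.Dict.keys, PySem.Dict.size] using congrArg List.length h
        omega
      obtain ⟨m, hm⟩ : ∃ m, PySem.List.min? d.keys (fun c => d.getD c 0) = some m := by
        cases hmo : PySem.List.min? d.keys (fun c => d.getD c 0) with
        | none => exact absurd (Iff.mp (PySem.List.min?_eq_none_iff _ _) hmo) hkeysne
        | some m => exact ⟨m, rfl⟩
      have hmk : m ∈ d.keys := PySem.List.min?_mem hm
      obtain ⟨p, hp, hp1⟩ : ∃ p ∈ d.items, p.1 = m := by
        simpa [PySem.Dict.keys] using hmk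
      obtain ⟨v, hvm⟩ : ∃ v, (m, v) ∈ d.items := ⟨p.2, by rwa [← hp1, Prod.mk.eta]⟩
      have hndf : (d.items.map Prod.fst).Nodup := by
        simpa [PySem.Dict.keys] using hnd
      have hget : d.getD m 0 = v := PySem.Dict.getD_of_mem_items d hvm hnd 0
      have hperm := perm_cons_filter_key d.items m v hndf hvm
      have heraseitems : (d.erase m).items = d.items.filter (fun p => !(p.1 == m)) := rfl
      have hvals : d.values.Perm (v :: (d.erase m).values) := by
        have := hperm.map Prod.snd
        simpa [PySem.Dict.values, heraseitems] using this
      have hsubl : ((d.erase m).items).Sublist d.items := by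
        rw [heraseitems]; exact List.filter_sublist
      have hnd' : (d.erase m).keys.Nodup := by
        have : ((d.erase m).items.map Prod.fst).Sublist (d.items.map Prod.fst) :=
          hsubl.map Prod.fst
        exact (hndf.sublist this : _)
      have hsize' : (d.erase m).size = d.size - 1 := by
        have := hperm.length_eq
        simp [PySem.Dict.size, heraseitems] at this ⊢
        omega
      have hmin : ∀ w ∈ (d.erase m).values, v ≤ w := by
        intro w hw
        obtain ⟨q, hq, hq2⟩ : ∃ q ∈ (d.erase m).items, q.2 = w := by
          simpa [PySem.Dict.values] using hw
        have hqd : q ∈ d.items := hsubl.mem hq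
        have hq1k : q.1 ∈ d.keys := by
          simp only [PySem.Dict.keys]
          exact List.mem_map_of_mem (f := fun x => x.1) hqd
        have hgq : d.getD q.1 0 = q.2 :=
          PySem.Dict.getD_of_mem_items d (by rwa [Prod.mk.eta]) hnd 0
        have := PySem.List.min?_isMin hm q.1 hq1k
        rw [hget, hgq, hq2] at this
        exact this
      have hsorted : PySem.List.sorted d.values (fun x => x)
          = v :: PySem.List.sorted (d.erase m).values (fun x => x) :=
        sorted_min_cons _ _ _ hvals hmin
      have hks' : k ≤ ((d.erase m).size : Int) := by rw [hsize']; omega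
      have hfuel' : (d.erase m).size - k.toNat ≤ fuel := by omega
      have ihh := ih (d.erase m) k (c + d.getD m 0) hnd' hk hks' hfuel'
      have htake : d.size - k.toNat = ((d.erase m).size - k.toNat) + 1 := by omega
      simp only [solveLoop, hsz, if_false, hm]
      rw [ihh, hsorted, htake, List.take_succ_cons, List.sum_cons, hget]
      ring

-- ===== VERDICT (by name: the statement is the Claim_ definition above) =====
theorem solve_spec : Claim_equal_solve := by
  intro s k _ hpre
  have hk0 : (0 : Int) ≤ k := hpre
  unfold Spec_solve solve solve_alt
  rw [buildA_eq_counter, PySem.Dict.foldl_insert_getD_add_one_eq_counter]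
  set d := PySem.Dict.counter s.toList with hd
  have hnd : d.keys.Nodup := PySem.Dict.nodup_keys_counter _
  have hlen : (PySem.List.sorted d.values (fun x => x)).length = d.size := by
    rw [(PySem.List.sorted_perm d.values _ false).length_eq]
    simp [PySem.Dict.values, PySem.Dict.size]
  simp only [hlen]
  by_cases hc : (d.size : Int) < k
  · simp [hc]
  · have hks : k ≤ (d.size : Int) := le_of_not_gt hc
    rw [if_neg hc, if_neg hc]
    rw [solveLoop_eq d.size d k 0 hnd hk0 hks (by omega)]
    rw [PySem.List.slice_to _ (by omega)]
    have : ((d.size : Int) - k).toNat = d.size - k.toNat := by omega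
    rw [this, zero_add]
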